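-- pv_equiv track=rewrite | github.com/t-montes/Matyno | matyno_module.py | ordenar_mts_semestre
-- ===== SOURCE A (Python) =====
-- def recurrent_ordenar_criterio(e: tuple):
--     if e[2] == 'Horario':
--         return len(e[1][e[0]][e[2]])
--     elif type(e[2]) is tuple:
--         return e[1][e[0]][e[2]][0]
--     else:
--         return e[1][e[0]][e[2]]
--
-- def ordenar_mts_semestre(mt: dict, rev: bool = False) -> dict:
--     """Retorna el mismo diccionario de materias dado por parámetro, ordenado por semestres"""
--     n_mts = {}
--     n_keys = []
--     for i in mt:
--         n_keys.append((i, mt, 'Semestre'))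
--     n_keys.sort(reverse= not rev, key=recurrent_ordenar_criterio)
--     for i in n_keys:
--         n_mts[i[0]] = mt[i[0]]
--     return n_mts
-- ===== SOURCE B (Python) =====
-- def ordenar_mts_semestre(mt: dict, rev: bool = False) -> dict:
--     """Group keys by their 'Semestre' value in one pass, then emit the buckets
--     in sorted semester order (descending unless rev) — no comparison sort of keys."""
--     buckets = {}
--     for k in mt:
--         buckets.setdefault(mt[k]['Semestre'], []).append(k)
--     out = {}
--     for s in sorted(buckets, reverse=not rev):
--         for k in buckets[s]:
--             out[k] = mt[k]
--     return out
-- ===== Notes on version B (the rewrite author's own statement) =====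
-- stated objective: alternative
-- what changed: Replaces the stable comparison sort of a (key, mt, 'Semestre') triple list by a one-pass grouping of keys into per-semester buckets followed by emitting the buckets in sorted semester order; Pre_ only excludes inputs where some subject dict lacks the 'Semestre' key, on which both A and B raise KeyError.
import Mathlib
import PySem

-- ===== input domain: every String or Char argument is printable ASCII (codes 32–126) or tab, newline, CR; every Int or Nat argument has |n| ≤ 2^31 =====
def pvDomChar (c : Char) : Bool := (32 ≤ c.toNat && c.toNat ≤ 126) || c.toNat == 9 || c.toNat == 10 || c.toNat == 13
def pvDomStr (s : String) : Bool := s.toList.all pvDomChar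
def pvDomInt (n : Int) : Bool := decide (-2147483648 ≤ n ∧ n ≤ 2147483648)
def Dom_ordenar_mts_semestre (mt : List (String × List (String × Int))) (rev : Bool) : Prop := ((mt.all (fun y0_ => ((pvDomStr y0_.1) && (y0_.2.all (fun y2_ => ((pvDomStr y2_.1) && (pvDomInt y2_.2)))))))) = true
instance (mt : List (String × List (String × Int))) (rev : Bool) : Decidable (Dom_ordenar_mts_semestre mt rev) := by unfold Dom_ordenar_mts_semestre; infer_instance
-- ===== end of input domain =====

-- B replaces A's stable comparison sort of (key, mt, 'Semestre') triples by a one-pass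
-- grouping of keys into per-semester buckets emitted in sorted semester order (objective: alternative).

-- the Python dict[str, dict[str,int]] the caller passes, decoded from the association list
def pvToDict (mt : List (String × List (String × Int))) : PySem.Dict String (PySem.Dict String Int) :=
  PySem.Dict.ofList (mt.map (fun p => (p.1, PySem.Dict.ofList p.2)))

-- ===== PORT A =====
-- Python helper recurrent_ordenar_criterio(e): at the one call site e[2] is always the
-- literal 'Semestre', so the "e[2] == 'Horario'" branch (len of an int: TypeError) and the
-- "type(e[2]) is tuple" branch are dead and untypeable at dict[str, dict[str,int]]; only the
-- live else branch e[1][e[0]][e[2]] is ported. The getD defaults stand for the KeyError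
-- inputs, which Pre_ excludes (Python raises there).
def recurrent_ordenar_criterio (e : String × PySem.Dict String (PySem.Dict String Int) × String) : Int :=
  ((e.2.1.getD e.1 PySem.Dict.empty).getD e.2.2 0)

def ordenar_mts_semestre (mt : List (String × List (String × Int))) (rev : Bool) : List (String × List (String × Int)) :=
  let d := pvToDict mt
  let n_keys := d.keys.map (fun i => (i, d, "Semestre"))
  let n_keys := PySem.List.sorted n_keys recurrent_ordenar_criterio (!rev)
  let n_mts := n_keys.foldl (fun acc i => acc.insert i.1 (i.2.1.getD i.1 PySem.Dict.empty)) PySem.Dict.empty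
  n_mts.items.map (fun p => (p.1, p.2.items))

-- ===== PORT B =====
-- mt[k]['Semestre'] (the getD default is dead under Pre_, as in port A)
def pvSemestre (d : PySem.Dict String (PySem.Dict String Int)) (k : String) : Int :=
  ((d.getD k PySem.Dict.empty).getD "Semestre" 0)

def ordenar_mts_semestre_alt (mt : List (String × List (String × Int))) (rev : Bool) : List (String × List (String × Int)) :=
  let d := pvToDict mt
  let buckets : PySem.Dict Int (List String) :=
    d.keys.foldl (fun b k => b.modify (pvSemestre d k) [] (fun l => l ++ [k])) PySem.Dict.empty
  let out := (PySem.List.sorted buckets.keys (fun s => s) (!rev)).foldl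
      (fun acc s => (buckets.getD s []).foldl (fun acc k => acc.insert k (d.getD k PySem.Dict.empty)) acc)
      PySem.Dict.empty
  out.items.map (fun p => (p.1, p.2.items))

-- ===== PRECONDITION & SPEC =====
-- Pre_ excludes exactly the inputs on which Python raises KeyError: some subject dict of mt
-- (as the dict the caller passes) lacking the key 'Semestre'. Both A and B raise there.
def Pre_ordenar_mts_semestre (mt : List (String × List (String × Int))) (rev : Bool) : Prop :=
  ∀ v ∈ (pvToDict mt).values, v.contains "Semestre" = true
instance (mt : List (String × List (String × Int))) (rev : Bool) : Decidable (Pre_ordenar_mts_semestre mt rev) := by unfold Pre_ordenar_mts_semestre; infer_instance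

def pvWitness_ordenar_mts_semestre : (List (String × List (String × Int))) × Bool :=
  ([("alg", [("Semestre", 2)]), ("calc", [("Semestre", 1)]), ("prog", [("Semestre", 2)])], false)

def Spec_ordenar_mts_semestre (mt : List (String × List (String × Int))) (rev : Bool) (out : List (String × List (String × Int))) : Prop := out = ordenar_mts_semestre_alt mt rev
instance (mt : List (String × List (String × Int))) (rev : Bool) (out : List (String × List (String × Int))) : Decidable (Spec_ordenar_mts_semestre mt rev out) := by unfold Spec_ordenar_mts_semestre; infer_instance

-- ===== CLAIM (what is proved, stated in full; the proofs are below) =====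
def Claim_equal_ordenar_mts_semestre : Prop := ∀ (mt : List (String × List (String × Int))) (rev : Bool), Dom_ordenar_mts_semestre mt rev → Pre_ordenar_mts_semestre mt rev → Spec_ordenar_mts_semestre mt rev (ordenar_mts_semestre mt rev)

-- ===== LEMMAS AND PROOFS =====

-- filtering one key value out of an insertion step into a key-sorted list: the new element lands after its ties
lemma pv_filter_insertBy {α : Type} (key : α → Int) (x : α) (s : Int) (ys : List α)
    (h : ys.Pairwise (fun a b => key a ≤ key b)) :
    (PySem.List.insertBy (fun a b => decide (key a < key b)) x ys).filter (fun z => key z == s)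
      = ys.filter (fun z => key z == s) ++ (if key x == s then [x] else []) := by
  induction ys with
  | nil =>
    simp [PySem.List.insertBy, List.filter_cons]
  | cons y ys ih =>
    obtain ⟨hy, hys⟩ := List.pairwise_cons.mp h
    simp only [PySem.List.insertBy]
    by_cases hlt : key x < key y
    · simp only [hlt, decide_true, if_true]
      by_cases hx : key x == s
      · have hxs : key x = s := by simpa using hx
        have hnil : (y :: ys).filter (fun z => key z == s) = [] := by
          apply List.filter_eq_nil_iff.mpr
          intro a ha
          have : key y ≤ key a := by
            rcases List.mem_cons.mp ha with h' | h'
            · rw [h']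
            · exact hy a h'
          simp only [beq_iff_eq]
          omega
        rw [List.filter_cons_of_pos (by simpa using hx), hnil]
        simp [hxs]
      · rw [List.filter_cons_of_neg (by simpa using hx)]
        simp [hx]
    · simp only [hlt, decide_false, Bool.false_eq_true, if_false]
      rw [List.filter_cons, List.filter_cons]
      rw [ih hys]
      by_cases hyz : key y == s <;> simp [hyz]

-- STABILITY of PySem's sort: ties keep xs's order, so filtering one key value commutes with sorting
lemma pv_filter_sorted {α : Type} (key : α → Int) (xs : List α) (s : Int) :
    (PySem.List.sorted xs key false).filter (fun z => key z == s) = xs.filter (fun z => key z == s) := by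
  induction xs using List.reverseRecOn with
  | nil => simp [PySem.List.sorted]
  | append_singleton xs x ih =>
    have hstep : PySem.List.sorted (xs ++ [x]) key false
        = PySem.List.insertBy (fun a b => decide (key a < key b)) x (PySem.List.sorted xs key false) := by
      rw [PySem.List.sorted_eq_foldl_insertBy, PySem.List.sorted_eq_foldl_insertBy, List.foldl_append]
      simp
    rw [hstep, pv_filter_insertBy key x s _ (PySem.List.sorted_pairwise xs key), ih, List.filter_append]
    congr 1
    by_cases hx : key x == s <;> simp [hx]

-- Python's stable reverse sort is the stable sort by the negated key
lemma pv_sorted_rev_eq_neg {α : Type} (key : α → Int) (xs : List α) :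
    PySem.List.sorted xs key true = PySem.List.sorted xs (fun a => -(key a)) false := by
  rw [PySem.List.sorted_rev_eq_foldl_insertBy, PySem.List.sorted_eq_foldl_insertBy]
  have hbe : (fun (a b : α) => decide (key b < key a)) = (fun a b => decide (-(key a) < -(key b))) := by
    funext a b
    simp only [decide_eq_decide]
    omega
  rw [hbe]

-- a stably key-sorted arrangement is unique: key-monotone + same per-key-value filters ⇒ equal
lemma pv_stable_unique {α : Type} (key : α → Int) (ys : List α) (zs : List α)
    (hy : ys.Pairwise (fun a b => key a ≤ key b)) (hz : zs.Pairwise (fun a b => key a ≤ key b))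
    (hf : ∀ s : Int, ys.filter (fun z => key z == s) = zs.filter (fun z => key z == s)) :
    ys = zs := by
  induction ys generalizing zs with
  | nil =>
    cases zs with
    | nil => rfl
    | cons b zs' =>
      have h := hf (key b)
      rw [List.filter_nil, List.filter_cons_of_pos (by simp)] at h
      exact absurd h (by simp)
  | cons a ys' ih =>
    cases zs with
    | nil =>
      have h := hf (key a)
      rw [List.filter_nil, List.filter_cons_of_pos (by simp)] at h
      exact absurd h (by simp)
    | cons b zs' =>
      obtain ⟨hya, hys'⟩ := List.pairwise_cons.mp hy
      obtain ⟨hzb, hzs'⟩ := List.pairwise_cons.mp hz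
      have hab : key a = key b := by
        have h1 := hf (key a)
        have h2 := hf (key b)
        have hmem1 : b ∈ (a :: ys').filter (fun z => key z == key b) := by
          rw [h2]; exact List.mem_filter.mpr ⟨List.mem_cons_self, by simp⟩
        have hmem2 : a ∈ (b :: zs').filter (fun z => key z == key a) := by
          rw [← h1]; exact List.mem_filter.mpr ⟨List.mem_cons_self, by simp⟩
        have hb1 := (List.mem_filter.mp hmem1).1
        have ha1 := (List.mem_filter.mp hmem2).1
        rcases List.mem_cons.mp hb1 with h' | h'
        · rw [h']
        · have hle1 : key a ≤ key b := hya b h'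
          rcases List.mem_cons.mp ha1 with h'' | h''
          · rw [h'']
          · have hle2 : key b ≤ key a := hzb a h''
            omega
      have h1 := hf (key a)
      rw [List.filter_cons_of_pos (by simp), List.filter_cons_of_pos (by simp [hab])] at h1
      injection h1 with hhead htail
      have hf' : ∀ s : Int, ys'.filter (fun z => key z == s) = zs'.filter (fun z => key z == s) := by
        intro s
        by_cases hs : key a = s
        · rw [← hs]; exact htail
        · have h := hf s
          rw [List.filter_cons_of_neg (by simp [hs]), List.filter_cons_of_neg (by simp [← hab, hs])] at h
          exact h
      rw [hhead, ih zs' hys' hzs' hf']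

-- sorting a mapped list (A's triples) is mapping the sorted originals (B's keys)
lemma pv_sorted_map_asc {α β : Type} (g : α → β) (key : β → Int) (xs : List α) :
    PySem.List.sorted (xs.map g) key false = (PySem.List.sorted xs (fun x => key (g x)) false).map g := by
  apply pv_stable_unique key
  · exact PySem.List.sorted_pairwise (xs.map g) key
  · rw [List.pairwise_map]
    exact PySem.List.sorted_pairwise xs (fun x => key (g x))
  · intro s
    rw [pv_filter_sorted, List.filter_map, List.filter_map]
    simp only [Function.comp_def]
    rw [pv_filter_sorted (fun x => key (g x)) xs s]

lemma pv_sorted_map {α β : Type} (g : α → β) (key : β → Int) (xs : List α) (r : Bool) :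
    PySem.List.sorted (xs.map g) key r = (PySem.List.sorted xs (fun x => key (g x)) r).map g := by
  cases r with
  | false => exact pv_sorted_map_asc g key xs
  | true =>
    rw [pv_sorted_rev_eq_neg, pv_sorted_rev_eq_neg]
    exact pv_sorted_map_asc g (fun b => -(key b)) xs

-- a flatMap that picks out one bucket of a duplicate-free index list
lemma pv_flatMap_ite {α : Type} (S : List Int) (hnd : S.Nodup) (F : List α) (t : Int) :
    S.flatMap (fun s => if s = t then F else []) = if t ∈ S then F else [] := by
  induction S with
  | nil => simp
  | cons s S' ih =>
    obtain ⟨hs, hnd'⟩ := List.nodup_cons.mp hnd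
    rw [List.flatMap_cons, ih hnd']
    by_cases h : s = t
    · subst h
      simp [hs]
    · have hts : ¬ t = s := fun hh => h hh.symm
      simp [h, List.mem_cons, hts]

-- emitting the per-key buckets along a strictly increasing key list IS the stable sort
lemma pv_group_eq_sorted {α : Type} (key : α → Int) (xs : List α) (S : List Int)
    (hS : S.Pairwise (· < ·)) (hmem : ∀ s : Int, s ∈ S ↔ s ∈ xs.map key) :
    S.flatMap (fun s => xs.filter (fun x => key x == s)) = PySem.List.sorted xs key false := by
  have hkey : ∀ (s : Int) (a : α), a ∈ xs.filter (fun x => key x == s) → key a = s := by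
    intro s a ha
    simpa using (List.mem_filter.mp ha).2
  apply pv_stable_unique key
  · rw [List.pairwise_flatMap]
    constructor
    · intro s _
      apply List.pairwise_of_forall_mem_list
      intro a ha b hb
      have h1 := hkey s a ha
      have h2 := hkey s b hb
      omega
    · apply hS.imp
      intro s t hst x hx y hy
      have h1 := hkey s x hx
      have h2 := hkey t y hy
      omega
  · exact PySem.List.sorted_pairwise xs key
  · intro t
    rw [pv_filter_sorted, List.filter_flatMap]
    have hcong : S.flatMap (fun s => (xs.filter (fun x => key x == s)).filter (fun z => key z == t))
        = S.flatMap (fun s => if s = t then xs.filter (fun x => key x == t) else []) := by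
      apply List.flatMap_congr
      intro s hs
      by_cases h : s = t
      · subst h; simp [List.filter_filter]
      · rw [if_neg h]
        apply List.filter_eq_nil_iff.mpr
        intro a ha
        have h1 := hkey s a ha
        simp only [beq_iff_eq]
        omega
    rw [hcong, pv_flatMap_ite S (hS.imp (fun h => ne_of_lt h)) _ t]
    by_cases ht : t ∈ S
    · simp [ht]
    · have : t ∉ xs.map key := fun h => ht ((hmem t).mpr h)
      rw [if_neg ht]
      symm
      apply List.filter_eq_nil_iff.mpr
      intro a ha
      simp only [beq_iff_eq]
      intro hh
      exact this (List.mem_map.mpr ⟨a, ha, hh⟩)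

-- the same, for either sort direction, with B's actual (distinct, set-ordered) semester list
lemma pv_group_any {α : Type} (key : α → Int) (xs : List α) (r : Bool) :
    (PySem.List.sorted (PySem.Set.ofList (xs.map key)) (fun s => s) r).flatMap
        (fun s => xs.filter (fun x => key x == s))
      = PySem.List.sorted xs key r := by
  cases r with
  | false =>
    apply pv_group_eq_sorted
    · exact PySem.List.sorted_ofList_pairwise_lt (xs.map key)
    · intro s
      rw [PySem.List.mem_sorted, PySem.Set.mem_ofList]
  | true =>
    rw [pv_sorted_rev_eq_neg key xs, pv_sorted_rev_eq_neg (fun s => s) (PySem.Set.ofList (xs.map key))]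
    set S := PySem.List.sorted (PySem.Set.ofList (xs.map key)) (fun a => -a) false with hSdef
    have hpred : ∀ s : Int, (fun x => key x == s) = (fun x => (-(key x) == -s)) := by
      intro s
      funext x
      simp
    have hstep : S.flatMap (fun s => xs.filter (fun x => key x == s))
        = (S.map (fun s => -s)).flatMap (fun t => xs.filter (fun x => (-(key x)) == t)) := by
      rw [List.flatMap_map]
      apply List.flatMap_congr
      intro s _
      rw [hpred s]
    rw [hstep]
    apply pv_group_eq_sorted (fun x => -(key x)) xs
    · have hnd : S.Nodup := by
        have hperm := PySem.List.sorted_perm (PySem.Set.ofList (xs.map key)) (fun a => -a) false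
        exact hperm.nodup_iff.mpr (PySem.Set.nodup_ofList (xs.map key))
      have hp : S.Pairwise (fun a b => -a ≤ -b) :=
        PySem.List.sorted_pairwise (PySem.Set.ofList (xs.map key)) (fun a => -a)
      have hlt : S.Pairwise (fun a b => -a < -b) := by
        have := List.Pairwise.and hp hnd
        apply this.imp
        intro a b hab
        rcases hab with ⟨h1, h2⟩
        omega
      rw [List.pairwise_map]
      exact hlt.imp (fun h => h)
    · intro t
      constructor
      · intro ht
        rcases List.mem_map.mp ht with ⟨s, hsS, rfl⟩
        have : s ∈ PySem.Set.ofList (xs.map key) := (PySem.List.mem_sorted ..).mp hsS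
        have : s ∈ xs.map key := (PySem.Set.mem_ofList ..).mp this
        rcases List.mem_map.mp this with ⟨x, hx, rfl⟩
        exact List.mem_map.mpr ⟨x, hx, rfl⟩
      · intro ht
        rcases List.mem_map.mp ht with ⟨x, hx, rfl⟩
        apply List.mem_map.mpr
        refine ⟨key x, ?_, by ring⟩
        rw [PySem.List.mem_sorted, PySem.Set.mem_ofList]
        exact List.mem_map.mpr ⟨x, hx, rfl⟩

-- ===== VERDICT (by name: the statement is the Claim_ definition above) =====
theorem ordenar_mts_semestre_spec : Claim_equal_ordenar_mts_semestre := by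
  intro mt rev _ _
  unfold Spec_ordenar_mts_semestre
  unfold ordenar_mts_semestre ordenar_mts_semestre_alt
  set d := pvToDict mt with hd
  set sem := pvSemestre d with hsem
  simp only []
  have hknd : d.keys.Nodup := PySem.Dict.nodup_keys_ofList _
  set r : Bool := !rev with hr
  have hcrit : (fun k => recurrent_ordenar_criterio (k, d, "Semestre")) = sem := rfl
  have hA1 : PySem.List.sorted (d.keys.map (fun i => (i, d, "Semestre"))) recurrent_ordenar_criterio r
      = (PySem.List.sorted d.keys sem r).map (fun k => (k, d, "Semestre")) := by
    rw [pv_sorted_map (fun k => (k, d, ("Semestre" : String))) recurrent_ordenar_criterio d.keys r, hcrit]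
  set L := PySem.List.sorted d.keys sem r with hL
  have hLnd : L.Nodup := ((PySem.List.sorted_perm d.keys sem r).nodup_iff).mpr hknd
  have hAitems :
      ((L.map (fun k => (k, d, ("Semestre" : String)))).foldl
          (fun acc i => acc.insert i.1 (i.2.1.getD i.1 PySem.Dict.empty)) PySem.Dict.empty).items
        = L.map (fun k => (k, d.getD k PySem.Dict.empty)) := by
    rw [PySem.Dict.items_foldl_insert_fresh (L.map (fun k => (k, d, ("Semestre" : String))))
        (fun i : String × PySem.Dict String (PySem.Dict String Int) × String => i.1)
        (fun i : String × PySem.Dict String (PySem.Dict String Int) × String => i.2.1.getD i.1 PySem.Dict.empty)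
        PySem.Dict.empty (fun a _ => PySem.Dict.contains_empty _)
        (by simpa [List.map_map, Function.comp_def] using hLnd)]
    simp [Function.comp_def, show (PySem.Dict.empty : PySem.Dict String (PySem.Dict String Int)).items = [] from rfl]
  set buckets : PySem.Dict Int (List String) :=
    d.keys.foldl (fun b k => b.modify (sem k) [] (fun l => l ++ [k])) PySem.Dict.empty with hbuckets
  have hbk : buckets.keys = PySem.Set.ofList (d.keys.map sem) := by
    rw [hbuckets, PySem.Dict.keys_foldl_modify_key d.keys sem [] (fun _ k l => l ++ [k]) PySem.Dict.empty]
    rfl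
  have hbD : ∀ s : Int, buckets.getD s [] = d.keys.filter (fun k => sem k == s) := by
    intro s
    have h := PySem.Dict.getD_foldl_modify_append (d.keys.map (fun k => (sem k, k))) PySem.Dict.empty s
    rw [List.foldl_map] at h
    rw [hbuckets]
    rw [h, PySem.Dict.getD_empty]
    rw [List.filter_map, List.map_map]
    simp [Function.comp_def]
  have hB1 : ((PySem.List.sorted buckets.keys (fun s => s) r).foldl
      (fun acc s => (buckets.getD s []).foldl (fun acc k => acc.insert k (d.getD k PySem.Dict.empty)) acc)
      PySem.Dict.empty).items = L.map (fun k => (k, d.getD k PySem.Dict.empty)) := by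
    rw [← List.foldl_flatMap]
    have hfm : (PySem.List.sorted buckets.keys (fun s => s) r).flatMap (fun s => buckets.getD s []) = L := by
      rw [List.flatMap_congr (fun s _ => hbD s), hbk, pv_group_any sem d.keys r]
    rw [hfm, PySem.Dict.items_foldl_insert_fresh L (fun k => k) (fun k => d.getD k PySem.Dict.empty)
        PySem.Dict.empty (fun a _ => PySem.Dict.contains_empty _) (by simpa using hLnd)]
    simp [show (PySem.Dict.empty : PySem.Dict String (PySem.Dict String Int)).items = [] from rfl]
  rw [hA1, hAitems, hB1]
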